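-- pv_equiv track=rewrite | github.com/GlatterAal/AdventOfCode2022 | Third/Third(b).py | getDoubles
-- ===== SOURCE A (Python) =====
-- def getDoubles(s1,s2,s3):
--     ret=""
--     for e in s1:
--         for j in s2:
--             for k in s3:
--                 if(e==j==k):
--                     ret=k
--                     break
--     return ret
-- ===== SOURCE B (Python) =====
-- def getDoubles(s1, s2, s3):
--     best = -1
--     ret = ""
--     for c in set(s2) & set(s3):
--         idx = s1.rfind(c)
--         if best < idx:
--             best = idx
--             ret = c
--     return ret
-- ===== Notes on version B (the rewrite author's own statement) =====
-- stated objective: faster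
-- what changed: Instead of scanning s1 with nested full scans of s2 and s3 and keeping the last match, B builds the common alphabet set(s2) & set(s3) once and, for each common character, takes its last occurrence index in s1 via rfind, returning the character with the maximal index.
import Mathlib
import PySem

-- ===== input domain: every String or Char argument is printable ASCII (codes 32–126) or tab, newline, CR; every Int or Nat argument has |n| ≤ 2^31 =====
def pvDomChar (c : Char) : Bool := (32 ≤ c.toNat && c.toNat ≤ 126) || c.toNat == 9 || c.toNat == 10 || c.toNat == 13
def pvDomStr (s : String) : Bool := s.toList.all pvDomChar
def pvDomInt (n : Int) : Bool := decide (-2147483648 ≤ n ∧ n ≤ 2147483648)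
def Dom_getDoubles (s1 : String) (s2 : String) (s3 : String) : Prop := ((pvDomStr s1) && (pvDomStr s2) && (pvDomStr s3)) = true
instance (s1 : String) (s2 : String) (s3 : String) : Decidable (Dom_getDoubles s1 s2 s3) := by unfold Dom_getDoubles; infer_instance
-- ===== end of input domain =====

-- B replaces A's triple nested scan (last char of s1 found in full scans of s2 and s3)
-- by one pass over the common alphabet set(s2) & set(s3), keeping the character whose
-- last occurrence (rfind) in s1 has the maximal index; objective: faster.

-- ===== PORT A =====
-- innermost 'for k in s3' loop with its break
def pvLoopK (e j : Char) (ret : String) : List Char → String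
  | [] => ret
  | k :: ks => if e = j ∧ j = k then String.mk [k] else pvLoopK e j ret ks

def getDoubles (s1 : String) (s2 : String) (s3 : String) : String :=
  s1.toList.foldl (fun ret e =>
    s2.toList.foldl (fun ret j => pvLoopK e j ret s3.toList) ret) ""

-- ===== PORT B =====
def getDoubles_alt (s1 : String) (s2 : String) (s3 : String) : String :=
  let common : PySem.Set Char := PySem.Set.inter (PySem.Set.ofList s2.toList) s3.toList
  (common.foldl (fun (st : Int × String) c =>
      let idx := PySem.Str.rfind s1 (String.mk [c])
      if st.1 < idx then (idx, String.mk [c]) else st) ((-1 : Int), "")).2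

-- ===== PRECONDITION & SPEC =====
def Spec_getDoubles (s1 : String) (s2 : String) (s3 : String) (out : String) : Prop := out = getDoubles_alt s1 s2 s3
instance (s1 : String) (s2 : String) (s3 : String) (out : String) : Decidable (Spec_getDoubles s1 s2 s3 out) := by unfold Spec_getDoubles; infer_instance

-- ===== CLAIM (what is proved, stated in full; the proofs are below) =====
def Claim_equal_getDoubles : Prop := ∀ (s1 : String) (s2 : String) (s3 : String), Dom_getDoubles s1 s2 s3 → Spec_getDoubles s1 s2 s3 (getDoubles s1 s2 s3)

-- ===== LEMMAS AND PROOFS =====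

theorem pvLoopK_eq (e j : Char) (ret : String) (ks : List Char) :
    pvLoopK e j ret ks = if e = j ∧ e ∈ ks then String.mk [e] else ret := by
  induction ks with
  | nil => simp [pvLoopK]
  | cons k ks ih =>
    simp only [pvLoopK, ih, List.mem_cons]
    by_cases h1 : e = j
    · subst h1
      by_cases h2 : e = k
      · subst h2; simp
      · simp [h2]
    · simp [h1]

theorem pvInnerJ (e : Char) (l2 l3 : List Char) (ret : String) :
    l2.foldl (fun ret j => pvLoopK e j ret l3) ret
      = if e ∈ l2 ∧ e ∈ l3 then String.mk [e] else ret := by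
  induction l2 generalizing ret with
  | nil => simp
  | cons j l2 ih =>
    rw [List.foldl_cons, ih, pvLoopK_eq]
    by_cases h2 : e ∈ l2 ∧ e ∈ l3
    · rw [if_pos h2, if_pos ⟨List.mem_cons.mpr (Or.inr h2.1), h2.2⟩]
    · rw [if_neg h2]
      by_cases h1 : e = j ∧ e ∈ l3
      · rw [if_pos h1, if_pos ⟨List.mem_cons.mpr (Or.inl h1.1), h1.2⟩]
      · rw [if_neg h1, if_neg (by simp only [List.mem_cons]; tauto)]

theorem pvA_eq (s1 s2 s3 : String) :
    getDoubles s1 s2 s3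
      = s1.toList.foldl
          (fun ret e => if e ∈ s2.toList ∧ e ∈ s3.toList then String.mk [e] else ret) "" := by
  unfold getDoubles
  congr 1
  funext ret e
  exact pvInnerJ e s2.toList s3.toList ret

-- [c].isPrefixOf u checks the head of u
theorem pvPrefixSingle (c : Char) (u : List Char) :
    [c].isPrefixOf u = true ↔ u.head? = some c := by
  cases u with
  | nil => simp [List.isPrefixOf]
  | cons b bs =>
    show ((c == b) && (([] : List Char).isPrefixOf bs)) = true ↔ _
    rw [show (([] : List Char).isPrefixOf bs) = true from rfl]
    simp only [Bool.and_true, beq_iff_eq, List.head?_cons, Option.some.injEq]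
    exact eq_comm

theorem pvGoLe (s sub : List Char) : ∀ k, PySem.Chars.rfind.go s sub k ≤ (k : Int) := by
  intro k
  induction k with
  | zero =>
    simp only [PySem.Chars.rfind.go]
    split <;> simp
  | succ n ih =>
    simp only [PySem.Chars.rfind.go]
    split
    · simp
    · exact le_trans ih (by push_cast; omega)

theorem pvRfindNil (c : Char) : PySem.Chars.rfind [] [c] = -1 := by
  simp [PySem.Chars.rfind, PySem.Chars.rfind.go, List.isPrefixOf]

theorem pvRfindLt (t : List Char) (c : Char) :
    PySem.Chars.rfind t [c] < (t.length : Int) := by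
  cases t with
  | nil => simp [pvRfindNil]
  | cons x xs =>
    show PySem.Chars.rfind.go (x :: xs) [c] (xs.length + 1) < _
    simp only [PySem.Chars.rfind.go]
    have hd : (List.drop (xs.length + 1) (x :: xs)) = [] := by
      apply List.drop_eq_nil_of_le; simp
    rw [hd]
    have : ([c].isPrefixOf ([] : List Char)) = false := rfl
    rw [this]
    simp only [Bool.false_eq_true, if_false, List.length_cons]
    calc PySem.Chars.rfind.go (x :: xs) [c] xs.length ≤ (xs.length : Int) := pvGoLe _ _ _
      _ < ((xs.length + 1 : Nat) : Int) := by push_cast; omega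

theorem pvHeadAppend (t : List Char) (a : Char) (h : t ≠ []) :
    (t ++ [a]).head? = t.head? := by
  cases t with
  | nil => exact absurd rfl h
  | cons y ys => simp

theorem pvPrefixAppend (t : List Char) (a c : Char) (h : t ≠ []) :
    ([c].isPrefixOf (t ++ [a])) = ([c].isPrefixOf t) := by
  by_cases hp : [c].isPrefixOf t = true
  · rw [hp]
    rw [pvPrefixSingle, pvHeadAppend t a h, ← pvPrefixSingle]
    exact hp
  · rw [eq_false_of_ne_true hp]
    apply eq_false_of_ne_true
    rw [pvPrefixSingle, pvHeadAppend t a h, ← pvPrefixSingle]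
    exact hp

theorem pvPrefixSingleNe (a c : Char) (h : c ≠ a) : ([c].isPrefixOf [a]) = false := by
  apply eq_false_of_ne_true
  intro hp
  have := (pvPrefixSingle c [a]).mp hp
  simp only [List.head?_cons, Option.some.injEq] at this
  exact h this.symm

theorem pvGoAppend (t : List Char) (a c : Char) :
    ∀ k, k < t.length → PySem.Chars.rfind.go (t ++ [a]) [c] k = PySem.Chars.rfind.go t [c] k := by
  intro k
  induction k with
  | zero =>
    intro hk
    simp only [PySem.Chars.rfind.go]
    rw [pvPrefixAppend t a c (List.ne_nil_of_length_pos hk)]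
  | succ n ih =>
    intro hk
    simp only [PySem.Chars.rfind.go]
    have hdr : List.drop (n + 1) (t ++ [a]) = List.drop (n + 1) t ++ [a] := by
      rw [List.drop_append_of_le_length (by omega)]
    have hne : (List.drop (n + 1) t) ≠ [] := by
      apply List.ne_nil_of_length_pos
      rw [List.length_drop]; omega
    rw [hdr, pvPrefixAppend _ a c hne]
    split
    · rfl
    · exact ih (by omega)

theorem pvRfindAppend (t : List Char) (a c : Char) :
    PySem.Chars.rfind (t ++ [a]) [c]
      = if c = a then (t.length : Int) else PySem.Chars.rfind t [c] := by
  cases t with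
  | nil =>
    show PySem.Chars.rfind.go [a] [c] 1 = _
    simp only [PySem.Chars.rfind.go]
    have h1 : List.drop 1 [a] = [] := rfl
    rw [h1]
    have hfalse : ([c].isPrefixOf ([] : List Char)) = false := rfl
    rw [hfalse]
    simp only [Bool.false_eq_true, if_false]
    by_cases hca : c = a
    · subst hca
      have : ([c].isPrefixOf [c]) = true := by rw [pvPrefixSingle]; rfl
      simp [this]
    · rw [pvPrefixSingleNe a c hca]
      simp [hca, pvRfindNil]
  | cons x xs =>
    have hlen : (x :: xs ++ [a]).length = (xs.length + 1) + 1 := by simp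
    show PySem.Chars.rfind.go (x :: xs ++ [a]) [c] ((x :: xs ++ [a]).length) = _
    rw [hlen]
    simp only [PySem.Chars.rfind.go]
    have hd1 : List.drop (xs.length + 1 + 1) (x :: xs ++ [a]) = [] := by
      apply List.drop_eq_nil_of_le; simp
    rw [hd1]
    have hfalse : ([c].isPrefixOf ([] : List Char)) = false := rfl
    rw [hfalse]
    simp only [Bool.false_eq_true, if_false]
    have hd2 : List.drop (xs.length + 1) (x :: xs ++ [a]) = [a] := by
      have h' : List.drop (xs.length + 1) (x :: xs ++ [a]) = List.drop (xs.length + 1) (x :: xs) ++ [a] := by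
        rw [List.drop_append_of_le_length (by simp)]
      rw [h', List.drop_eq_nil_of_le (by simp)]; rfl
    rw [hd2]
    by_cases hca : c = a
    · subst hca
      have : ([c].isPrefixOf [c]) = true := by rw [pvPrefixSingle]; rfl
      rw [this]
      simp
    · rw [pvPrefixSingleNe a c hca]
      simp only [Bool.false_eq_true, if_false, hca]
      rw [pvGoAppend (x :: xs) a c xs.length (by simp)]
      show _ = PySem.Chars.rfind.go (x :: xs) [c] (xs.length + 1)
      simp only [PySem.Chars.rfind.go]
      have hd3 : List.drop (xs.length + 1) (x :: xs) = [] := by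
        apply List.drop_eq_nil_of_le; simp
      rw [hd3, hfalse]
      simp

-- generic fold lemmas for B's max-tracking loop
theorem pvFoldNoupdate (key : Char → Int) (f : Char → String) :
    ∀ (cs : List Char) (st : Int × String), (∀ y ∈ cs, ¬ st.1 < key y) →
      cs.foldl (fun st c => if st.1 < key c then (key c, f c) else st) st = st := by
  intro cs
  induction cs with
  | nil => intro st _; rfl
  | cons c cs ih =>
    intro st h
    simp only [List.foldl_cons]
    rw [if_neg (h c (by simp))]
    exact ih st (fun y hy => h y (by simp [hy]))

theorem pvFoldMax (key : Char → Int) (f : Char → String) :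
    ∀ (cs : List Char) (st : Int × String) (x : Char), x ∈ cs → st.1 < key x →
      (∀ y ∈ cs, y ≠ x → key y < key x) →
      cs.foldl (fun st c => if st.1 < key c then (key c, f c) else st) st = (key x, f x) := by
  intro cs
  induction cs with
  | nil => intro st x hx; exact absurd hx (by simp)
  | cons c cs ih =>
    intro st x hx hlt hmax
    simp only [List.foldl_cons]
    by_cases hcx : c = x
    · subst hcx
      rw [if_pos hlt]
      apply pvFoldNoupdate
      intro y hy
      by_cases hyx : y = c
      · subst hyx; simp
      · have := hmax y (by simp [hy]) hyx
        simp; omega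
    · have hx' : x ∈ cs := by rcases List.mem_cons.mp hx with h | h; exact absurd h.symm hcx; exact h
      have hkey : ∀ st' : Int × String, st'.1 < key x →
          (if st.1 < key c then (key c, f c) else st).1 < key x := by
        intro _ _
        split
        · exact hmax c (by simp) hcx
        · exact hlt
      exact ih _ x hx' (hkey st hlt) (fun y hy hyx => hmax y (by simp [hy]) hyx)

-- main: A's last-common-char fold equals B's max-of-rfind fold
theorem pvMain (p : Char → Prop) [DecidablePred p] :
    ∀ (l1 cs : List Char), (∀ c, c ∈ cs ↔ p c) →
      l1.foldl (fun ret e => if p e then String.mk [e] else ret) ""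
        = (cs.foldl (fun (st : Int × String) c =>
              if st.1 < PySem.Chars.rfind l1 [c]
              then (PySem.Chars.rfind l1 [c], String.mk [c]) else st) ((-1 : Int), "")).2 := by
  intro l1
  induction l1 using List.reverseRecOn with
  | nil =>
    intro cs _
    rw [pvFoldNoupdate (fun c => PySem.Chars.rfind [] [c]) (fun c => String.mk [c]) cs
          ((-1 : Int), "")
          (fun y _ => by
            show ¬((-1 : Int), "").1 < PySem.Chars.rfind [] [y]
            rw [pvRfindNil]; simp)]
    rfl
  | append_singleton t a ih =>
    intro cs hiff
    rw [List.foldl_append]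
    simp only [List.foldl_cons, List.foldl_nil]
    have hka : PySem.Chars.rfind (t ++ [a]) [a] = (t.length : Int) := by
      rw [pvRfindAppend, if_pos rfl]
    by_cases hp : p a
    · rw [if_pos hp]
      rw [pvFoldMax (fun c => PySem.Chars.rfind (t ++ [a]) [c]) (fun c => String.mk [c]) cs
            ((-1 : Int), "") a ((hiff a).mpr hp)
            (by
              show ((-1 : Int), "").1 < PySem.Chars.rfind (t ++ [a]) [a]
              rw [hka]
              show (-1 : Int) < (t.length : Int)
              omega)
            (by
              intro y _ hya
              show PySem.Chars.rfind (t ++ [a]) [y] < PySem.Chars.rfind (t ++ [a]) [a]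
              rw [hka, pvRfindAppend, if_neg hya]
              exact pvRfindLt t y)]
    · rw [if_neg hp]
      rw [ih cs hiff]
      congr 1
      apply PySem.List.foldl_congr_mem
      intro st c hc
      have hca : c ≠ a := fun h => hp (h ▸ (hiff c).mp hc)
      rw [pvRfindAppend, if_neg hca]

-- ===== VERDICT (by name: the statement is the Claim_ definition above) =====
theorem getDoubles_spec : Claim_equal_getDoubles := by
  intro s1 s2 s3 _
  unfold Spec_getDoubles getDoubles_alt
  rw [pvA_eq]
  have hiff : ∀ c, c ∈ PySem.Set.inter (PySem.Set.ofList s2.toList) s3.toList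
      ↔ (c ∈ s2.toList ∧ c ∈ s3.toList) := by
    intro c
    rw [PySem.Set.mem_inter, PySem.Set.mem_ofList]
  have h := pvMain (fun e => e ∈ s2.toList ∧ e ∈ s3.toList) s1.toList
      (PySem.Set.inter (PySem.Set.ofList s2.toList) s3.toList) hiff
  rw [h]
  have hmk : ∀ c : Char, (String.mk [c]).toList = [c] := fun c => Eq.symm (String.ofList_eq.mp rfl)
  simp only [PySem.Str.rfind_eq, hmk]
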